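-- pv_equiv track=rewrite | github.com/arunpokali/PythonProjects | PowerProgrammer/shopping_items.py | solve
-- ===== SOURCE A (Python) =====
-- def solve(arr, n):
--     dp = [ [0,0,0] for x in range(n) ]
--     dp[0] = arr[0]
--
--     for i in range(1, n):
--         dp[i][0] = arr[i][0] + min(dp[i-1][1], dp[i-1][2])
--         dp[i][1] = arr[i][1] + min(dp[i-1][0], dp[i-1][2])
--         dp[i][2] = arr[i][2] + min(dp[i-1][1], dp[i-1][0])
--
--
--     return min(dp[-1])
-- ===== SOURCE B (Python) =====
-- def solve(arr, n):
--     # top-down memoized recursion: best(i, c) = min cost of rows 0..i with row i taking item c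
--     memo = {}
--
--     def best(i, c):
--         if (i, c) not in memo:
--             if i == 0:
--                 memo[(i, c)] = arr[0][c]
--             else:
--                 memo[(i, c)] = arr[i][c] + min(best(i - 1, d) for d in range(3) if d != c)
--         return memo[(i, c)]
--
--     if n == 1:
--         return min(arr[0])
--     return min(best(n - 1, c) for c in range(3))
-- ===== Notes on version B (the rewrite author's own statement) =====
-- stated objective: alternative
-- what changed: Replaced the bottom-up dp-table fill with a top-down memoized recursion best(i,c) over (row, choice), with a direct min(arr[0]) for a single row.
import Mathlib
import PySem

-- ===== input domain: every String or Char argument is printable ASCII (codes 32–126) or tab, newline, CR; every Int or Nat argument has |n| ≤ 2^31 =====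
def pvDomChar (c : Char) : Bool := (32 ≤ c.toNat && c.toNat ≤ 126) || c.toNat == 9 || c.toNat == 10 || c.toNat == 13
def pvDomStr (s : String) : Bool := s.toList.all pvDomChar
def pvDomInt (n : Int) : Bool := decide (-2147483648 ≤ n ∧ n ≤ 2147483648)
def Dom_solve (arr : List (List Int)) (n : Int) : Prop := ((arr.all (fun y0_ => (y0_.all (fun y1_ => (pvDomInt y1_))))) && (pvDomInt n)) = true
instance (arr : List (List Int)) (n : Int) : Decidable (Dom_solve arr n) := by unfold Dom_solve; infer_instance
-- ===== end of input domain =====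

-- B replaces the bottom-up dp-table fill by a top-down recursion best(i,c) over (row, choice); same cost, different decomposition.

-- ===== PORT A =====
-- dp[0] = arr[0] (Python aliases the row; only the return value is claimed here, neither program mutates arr)
def dpInitA (arr : List (List Int)) (n : Int) : List (List Int) :=
  PySem.List.pySetD ((PySem.List.pyRange 0 n 1).map (fun _ => ([0, 0, 0] : List Int))) 0
    (PySem.List.pyGetD arr 0 [])

-- one loop iteration: the three sequential writes dp[i][c] = … read only row dp[i-1] (i ≥ 1),
-- so writing the fresh triple in one pySetD is the same values in the same order
def stepA (arr : List (List Int)) (dp : List (List Int)) (i : Int) : List (List Int) :=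
  let g : List Int → Int → Int := fun l j => PySem.List.pyGetD l j 0
  let prev := PySem.List.pyGetD dp (i - 1) []
  PySem.List.pySetD dp i
    [g (PySem.List.pyGetD arr i []) 0 + min (g prev 1) (g prev 2),
     g (PySem.List.pyGetD arr i []) 1 + min (g prev 0) (g prev 2),
     g (PySem.List.pyGetD arr i []) 2 + min (g prev 1) (g prev 0)]

def solve (arr : List (List Int)) (n : Int) : Int :=
  let dp := dpInitA arr n
  let dp := (PySem.List.pyRange 1 n 1).foldl (stepA arr) dp
  (PySem.List.min? (PySem.List.pyGetD dp (-1) []) (fun x => x)).getD 0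

-- ===== PORT B =====
-- best(i, c) of Source B; the memo dict is pure caching and is elided in the port (same values)
def bestB (arr : List (List Int)) : Nat → Int → Int
  | 0, c => PySem.List.pyGetD (PySem.List.pyGetD arr 0 []) c 0
  | i + 1, c =>
      PySem.List.pyGetD (PySem.List.pyGetD arr ((i : Int) + 1) []) c 0 +
        (PySem.List.min? (((PySem.List.pyRange 0 3 1).filter (fun d => d ≠ c)).map (bestB arr i))
          (fun x => x)).getD 0

def solve_alt (arr : List (List Int)) (n : Int) : Int :=
  if n = 1 then (PySem.List.min? (PySem.List.pyGetD arr 0 []) (fun x => x)).getD 0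
  else
    (PySem.List.min? ((PySem.List.pyRange 0 3 1).map (fun c => bestB arr (n - 1).toNat c))
      (fun x => x)).getD 0

-- ===== PRECONDITION & SPEC =====
-- Pre_ = exactly where Python A returns: n ≥ 1 rows exist (else IndexError), a single row must be
-- non-empty (min of empty raises), and with n ≥ 2 every used row needs indices 0..2 (else IndexError).
def Pre_solve (arr : List (List Int)) (n : Int) : Prop :=
  1 ≤ n ∧ n ≤ (arr.length : Int) ∧ (n = 1 → arr.headD [] ≠ []) ∧
    (2 ≤ n → ∀ row ∈ arr.take n.toNat, 3 ≤ row.length)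
instance (arr : List (List Int)) (n : Int) : Decidable (Pre_solve arr n) := by
  unfold Pre_solve; infer_instance
def pvWitness_solve : List (List Int) × Int := ([[1, 2, 3], [4, 5, 6]], 2)
def Spec_solve (arr : List (List Int)) (n : Int) (out : Int) : Prop := out = solve_alt arr n
instance (arr : List (List Int)) (n : Int) (out : Int) : Decidable (Spec_solve arr n out) := by
  unfold Spec_solve; infer_instance

-- ===== CLAIM (what is proved, stated in full; the proofs are below) =====
def Claim_equal_solve : Prop :=
  ∀ (arr : List (List Int)) (n : Int), Dom_solve arr n → Pre_solve arr n →
    Spec_solve arr n (solve arr n)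

-- ===== LEMMAS AND PROOFS =====

lemma pvRange3 : PySem.List.pyRange 0 3 1 = [0, 1, 2] := by decide

lemma pvTrip_get' (x0 x1 x2 : Int) :
    PySem.List.pyGetD [x0, x1, x2] 0 0 = x0 ∧ PySem.List.pyGetD [x0, x1, x2] 1 0 = x1 ∧
      PySem.List.pyGetD [x0, x1, x2] 2 0 = x2 := by
  refine ⟨?_, ?_, ?_⟩ <;> simp [PySem.List.pyGetD, PySem.List.pyIdx?, PySem.List.pyGet?]

lemma pvDpInit_length (arr : List (List Int)) (N : Nat) :
    (dpInitA arr (N : Int)).length = N := by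
  simp [dpInitA, PySem.List.length_pySetD, PySem.List.length_pyRange_one]

lemma pvInv (arr : List (List Int)) (N : Nat) (hN : 1 ≤ N) :
    ∀ k : Nat, k < N →
      ((PySem.List.pyRange 1 ((k : Int) + 1) 1).foldl (stepA arr) (dpInitA arr (N : Int))).length = N ∧
      (∀ c : Int, c = 0 ∨ c = 1 ∨ c = 2 →
        PySem.List.pyGetD
          (PySem.List.pyGetD
            ((PySem.List.pyRange 1 ((k : Int) + 1) 1).foldl (stepA arr) (dpInitA arr (N : Int)))
            (k : Int) []) c 0 = bestB arr k c) ∧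
      (1 ≤ k →
        PySem.List.pyGetD
          ((PySem.List.pyRange 1 ((k : Int) + 1) 1).foldl (stepA arr) (dpInitA arr (N : Int)))
          (k : Int) [] = [bestB arr k 0, bestB arr k 1, bestB arr k 2]) := by
  intro k
  induction k with
  | zero =>
    intro hk
    rw [show ((0 : Nat) : Int) + 1 = 1 by norm_num, PySem.List.pyRange_one_eq_nil (by norm_num)]
    simp only [List.foldl_nil]
    refine ⟨pvDpInit_length arr N, ?_, by omega⟩
    have hlen : ((PySem.List.pyRange 0 (N : Int) 1).map
        (fun _ => ([0, 0, 0] : List Int))).length = N := by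
      simp [PySem.List.length_pyRange_one]
    obtain ⟨h, t, hht⟩ := List.exists_cons_of_ne_nil
      (show ((PySem.List.pyRange 0 (N : Int) 1).map (fun _ => ([0, 0, 0] : List Int))) ≠ [] by
        intro hnil; rw [hnil] at hlen; simp at hlen; omega)
    intro c hc
    have : dpInitA arr (N : Int) = PySem.List.pyGetD arr 0 [] :: t := by
      rw [dpInitA, hht, show (0 : Int) = ((0 : Nat) : Int) from rfl, PySem.List.pySetD_natCast]
      rfl
    rw [this]
    rw [show ((0 : Nat) : Int) = 0 by norm_num, PySem.List.pyGetD_zero_cons]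
    rfl
  | succ k ih =>
    intro hk
    have hk' : k < N := by omega
    obtain ⟨ihlen, ihget, _⟩ := ih hk'
    have hsplit : PySem.List.pyRange 1 (((k + 1 : Nat) : Int) + 1) 1
        = PySem.List.pyRange 1 ((k : Int) + 1) 1 ++ [(k : Int) + 1] := by
      have := PySem.List.pyRange_one_succ_right (a := 1) (b := (k : Int) + 1) (by omega)
      push_cast
      rw [this]
    rw [hsplit, List.foldl_append]
    set dpk := (PySem.List.pyRange 1 ((k : Int) + 1) 1).foldl (stepA arr) (dpInitA arr (N : Int))
      with hdpk
    simp only [List.foldl_cons, List.foldl_nil]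
    -- the step
    have hprev : ∀ c : Int, c = 0 ∨ c = 1 ∨ c = 2 →
        PySem.List.pyGetD (PySem.List.pyGetD dpk ((k : Int) + 1 - 1) []) c 0 = bestB arr k c := by
      intro c hc
      rw [show (k : Int) + 1 - 1 = (k : Int) by ring]
      exact ihget c hc
    have h0 := hprev 0 (by norm_num)
    have h1 := hprev 1 (by norm_num)
    have h2 := hprev 2 (by norm_num)
    set row := PySem.List.pyGetD arr ((k : Int) + 1) [] with hrow
    -- the new triple equals bestB at k+1
    have hb : ∀ c : Int, c = 0 ∨ c = 1 ∨ c = 2 →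
        bestB arr (k + 1) c = PySem.List.pyGetD row c 0 +
          (PySem.List.min? (((PySem.List.pyRange 0 3 1).filter (fun d => d ≠ c)).map (bestB arr k))
            (fun x => x)).getD 0 := by
      intro c _; rfl
    have hv0 : bestB arr (k + 1) 0 = PySem.List.pyGetD row 0 0 +
        min (bestB arr k 1) (bestB arr k 2) := by
      rw [hb 0 (by norm_num), pvRange3]
      norm_num [PySem.List.min?_id_cons]
    have hv1 : bestB arr (k + 1) 1 = PySem.List.pyGetD row 1 0 +
        min (bestB arr k 0) (bestB arr k 2) := by
      rw [hb 1 (by norm_num), pvRange3]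
      norm_num [PySem.List.min?_id_cons]
    have hv2 : bestB arr (k + 1) 2 = PySem.List.pyGetD row 2 0 +
        min (bestB arr k 0) (bestB arr k 1) := by
      rw [hb 2 (by norm_num), pvRange3]
      norm_num [PySem.List.min?_id_cons]
    have hstep : stepA arr dpk ((k : Int) + 1)
        = dpk.set (k + 1) [bestB arr (k + 1) 0, bestB arr (k + 1) 1, bestB arr (k + 1) 2] := by
      unfold stepA
      simp only
      rw [h0, h1, h2, hv0, hv1, hv2, hrow, min_comm (bestB arr k 1) (bestB arr k 0)]
      rw [show ((k : Int) + 1) = ((k + 1 : Nat) : Int) by push_cast; ring,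
        PySem.List.pySetD_natCast]
    have hgetnew : PySem.List.pyGetD (stepA arr dpk ((k : Int) + 1)) ((k + 1 : Nat) : Int) []
        = [bestB arr (k + 1) 0, bestB arr (k + 1) 1, bestB arr (k + 1) 2] := by
      rw [hstep, PySem.List.pyGetD_natCast]
      rw [List.getD_eq_getElem?_getD, List.getElem?_set_self (by omega)]
      rfl
    refine ⟨by rw [hstep]; simpa using ihlen, ?_, fun _ => hgetnew⟩
    intro c hc
    rw [hgetnew]
    obtain ⟨g0, g1, g2⟩ := pvTrip_get' (bestB arr (k + 1) 0) (bestB arr (k + 1) 1)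
      (bestB arr (k + 1) 2)
    rcases hc with h | h | h <;> subst h
    · exact g0
    · exact g1
    · exact g2

-- ===== VERDICT (by name: the statement is the Claim_ definition above) =====
theorem solve_spec : Claim_equal_solve := by
  intro arr n _ hpre
  obtain ⟨h1, h2, _, _⟩ := hpre
  unfold Spec_solve
  have hA : solve arr n = (PySem.List.min?
      (PySem.List.pyGetD ((PySem.List.pyRange 1 n 1).foldl (stepA arr) (dpInitA arr n)) (-1) [])
      (fun x => x)).getD 0 := rfl
  have hB : solve_alt arr n = if n = 1 then
        (PySem.List.min? (PySem.List.pyGetD arr 0 []) (fun x => x)).getD 0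
      else
        (PySem.List.min? ((PySem.List.pyRange 0 3 1).map (fun c => bestB arr (n - 1).toNat c))
          (fun x => x)).getD 0 := rfl
  rw [hA, hB]
  by_cases hn1 : n = 1
  · subst hn1
    rw [if_pos rfl,
      show PySem.List.pyRange 1 1 1 = [] from PySem.List.pyRange_one_eq_nil (by norm_num)]
    simp only [List.foldl_nil]
    have hinit : dpInitA arr 1 = [PySem.List.pyGetD arr 0 []] := by
      rw [dpInitA, show PySem.List.pyRange 0 1 1 = [0] from by decide]
      rfl
    rw [hinit, show ([PySem.List.pyGetD arr 0 []] : List (List Int))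
        = [] ++ [PySem.List.pyGetD arr 0 []] from rfl,
      PySem.List.pyGetD_neg_one_append_singleton]
  · have hn2 : 2 ≤ n := by omega
    rw [if_neg hn1]
    set N := n.toNat with hNdef
    have hNn : (N : Int) = n := by omega
    have hN2 : 2 ≤ N := by omega
    have hrange : PySem.List.pyRange 1 n 1
        = PySem.List.pyRange 1 (((N - 1 : Nat) : Int) + 1) 1 := by
      congr 1; omega
    obtain ⟨hlen, _, hlast⟩ := pvInv arr N (by omega) (N - 1) (by omega)
    rw [hrange, ← hNn]
    set dp := (PySem.List.pyRange 1 (((N - 1 : Nat) : Int) + 1) 1).foldl (stepA arr)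
      (dpInitA arr (N : Int)) with hdp
    have hne : dp ≠ [] := by intro h; rw [h] at hlen; simp at hlen; omega
    have hgl : PySem.List.pyGetD dp (-1) [] = PySem.List.pyGetD dp ((N - 1 : Nat) : Int) [] := by
      rw [PySem.List.pyGetD_neg_one dp [] hne, PySem.List.pyGetD_natCast,
        List.getD_eq_getElem?_getD, List.getElem?_eq_getElem (by omega),
        List.getLast_eq_getElem]
      simp [hlen]
    rw [hgl, hlast (by omega), pvRange3]
    have htn : ((N : Int) - 1).toNat = N - 1 := by omega
    rw [htn]
    rfl
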